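-- pv_equiv track=rewrite | github.com/Jetstibbe/Computer_Science_TypedMSMP- | msmp_typed_variants.py | generate_r_b_pairs
-- ===== SOURCE A (Python) =====
-- from typing import Dict, List, Sequence, Set, Tuple
--
-- def generate_r_b_pairs(n_hashes: int) -> List[Tuple[int, int]]:
--     """
--     Generate all (rows_per_band, bands) pairs compatible with the
--     exact and plus-one layouts used by the LSH implementation.
--     """
--     pairs: Set[Tuple[int, int]] = set()
--
--     for r in range(1, n_hashes + 1):
--         # first (exact) layout: bands * r == n_hashes
--         if n_hashes % r == 0:
--             b = n_hashes // r
--             if b >= 1: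
--                 pairs.add((r, b))
--
--         # second (plus-one) layout: bands * r == n_hashes + 1, only if r > 1
--         if r > 1 and (n_hashes + 1) % r == 0:
--             b = (n_hashes + 1) // r
--             if b >= 1:
--                 pairs.add((r, b))
--
--     return sorted(pairs)
-- ===== SOURCE B (Python) =====
-- from typing import List, Tuple
--
-- def _divisors(m: int) -> List[int]:
--     """All positive divisors of m (empty for m < 1), via trial division up to sqrt(m)."""
--     ds: List[int] = []
--     i = 1
--     while i * i <= m:
--         if m % i == 0:
--             ds.append(i)
--             j = m // i
--             if j != i:
--                 ds.append(j)
--         i += 1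
--     return ds
--
--
-- def generate_r_b_pairs(n_hashes: int) -> List[Tuple[int, int]]:
--     pairs = {(r, n_hashes // r) for r in _divisors(n_hashes)}
--     for r in _divisors(n_hashes + 1):
--         if 1 < r <= n_hashes:
--             pairs.add((r, (n_hashes + 1) // r))
--     return sorted(pairs)
-- ===== Notes on version B (the rewrite author's own statement) =====
-- stated objective: faster
-- what changed: Replaces A's O(n) scan over every r in 1..n by trial-division divisor enumeration of n and n+1 up to their square roots, then builds the same pair set and sorts it.
import Mathlib
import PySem

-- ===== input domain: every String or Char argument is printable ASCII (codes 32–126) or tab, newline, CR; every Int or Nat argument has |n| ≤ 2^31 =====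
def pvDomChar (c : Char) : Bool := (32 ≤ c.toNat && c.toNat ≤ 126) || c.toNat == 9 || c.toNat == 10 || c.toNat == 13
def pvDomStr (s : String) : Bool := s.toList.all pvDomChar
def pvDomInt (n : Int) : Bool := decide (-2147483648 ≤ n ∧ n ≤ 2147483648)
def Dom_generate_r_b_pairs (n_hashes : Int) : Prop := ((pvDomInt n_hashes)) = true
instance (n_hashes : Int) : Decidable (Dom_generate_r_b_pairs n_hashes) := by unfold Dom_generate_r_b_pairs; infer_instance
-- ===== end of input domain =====

-- B replaces A's O(n) scan of r = 1..n by divisor enumeration of n and n+1 via trial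
-- division up to √ (O(√n) before sorting); same return value for every int input.

-- ===== PORT A =====
-- loop body of A's 'for r in range(1, n_hashes + 1)' (named so the proofs can speak about it)
def stepA (n_hashes : Int) (pairs : PySem.Set (Int × Int)) (r : Int) : PySem.Set (Int × Int) :=
  let pairs :=
    if PySem.Int.mod n_hashes r = 0 then
      let b := PySem.Int.floordiv n_hashes r
      if b ≥ 1 then PySem.Set.add pairs (r, b) else pairs
    else pairs
  if 1 < r ∧ PySem.Int.mod (n_hashes + 1) r = 0 then
    let b := PySem.Int.floordiv (n_hashes + 1) r
    if b ≥ 1 then PySem.Set.add pairs (r, b) else pairs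
  else pairs

def generate_r_b_pairs (n_hashes : Int) : List (Int × Int) :=
  let pairs : PySem.Set (Int × Int) := PySem.Set.empty
  let pairs := (PySem.List.pyRange 1 (n_hashes + 1) 1).foldl (stepA n_hashes) pairs
  PySem.List.sorted2 pairs Prod.fst Prod.snd  -- sorted(pairs): Python tuple order = lexicographic

-- ===== PORT B =====
-- the 'while i * i <= m' trial-division loop of _divisors (the 1 ≤ i argument only
-- justifies termination; every call has i ≥ 1)
def divisorsAux (m i : Int) (ds : List Int) (hi : 1 ≤ i) : List Int :=
  if i * i ≤ m then
    divisorsAux m (i + 1)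
      (if PySem.Int.mod m i = 0 then
        let j := PySem.Int.floordiv m i
        (ds ++ [i]) ++ (if j ≠ i then [j] else [])
      else ds) (by omega)
  else ds
termination_by (m + 1 - i).toNat
decreasing_by
  rename_i h
  have : i ≤ i * i := le_mul_of_one_le_left (by omega) hi
  omega

def divisors (m : Int) : List Int := divisorsAux m 1 [] (le_refl 1)

def generate_r_b_pairs_alt (n_hashes : Int) : List (Int × Int) :=
  let pairs : PySem.Set (Int × Int) :=
    PySem.Set.ofList ((divisors n_hashes).map (fun r => (r, PySem.Int.floordiv n_hashes r)))
  let pairs := (divisors (n_hashes + 1)).foldl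
    (fun pairs r =>
      if 1 < r ∧ r ≤ n_hashes then
        PySem.Set.add pairs (r, PySem.Int.floordiv (n_hashes + 1) r)
      else pairs) pairs
  PySem.List.sorted2 pairs Prod.fst Prod.snd

-- ===== PRECONDITION & SPEC =====
def Spec_generate_r_b_pairs (n_hashes : Int) (out : List (Int × Int)) : Prop := out = generate_r_b_pairs_alt n_hashes
instance (n_hashes : Int) (out : List (Int × Int)) : Decidable (Spec_generate_r_b_pairs n_hashes out) := by unfold Spec_generate_r_b_pairs; infer_instance

-- ===== CLAIM (what is proved, stated in full; the proofs are below) =====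
def Claim_equal_generate_r_b_pairs : Prop := ∀ (n_hashes : Int), Dom_generate_r_b_pairs n_hashes → Spec_generate_r_b_pairs n_hashes (generate_r_b_pairs n_hashes)

-- ===== LEMMAS AND PROOFS =====

-- the characterisation both programs' sets satisfy
def PairsProp (n : Int) (x : Int × Int) : Prop :=
  (1 ≤ x.1 ∧ x.1 ≤ n ∧ x.1 ∣ n ∧ x.2 = n / x.1) ∨
  (2 ≤ x.1 ∧ x.1 ≤ n ∧ x.1 ∣ (n + 1) ∧ x.2 = (n + 1) / x.1)

-- generic: membership through a fold whose step only (conditionally) adds elements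
theorem mem_foldl_add {α β : Type} (f : List α → β → List α) (Q : β → α → Prop)
    (hf : ∀ s r x, x ∈ f s r ↔ x ∈ s ∨ Q r x) :
    ∀ (l : List β) (s : List α) (x : α), x ∈ l.foldl f s ↔ x ∈ s ∨ ∃ r ∈ l, Q r x := by
  intro l
  induction l with
  | nil => simp
  | cons a t ih =>
    intro s x
    simp only [List.foldl_cons, ih, hf, List.mem_cons]
    constructor
    · rintro ((h | h) | ⟨r, hr, hq⟩)
      · exact Or.inl h
      · exact Or.inr ⟨a, Or.inl rfl, h⟩
      · exact Or.inr ⟨r, Or.inr hr, hq⟩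
    · rintro (h | ⟨r, (rfl | hr), hq⟩)
      · exact Or.inl (Or.inl h)
      · exact Or.inl (Or.inr hq)
      · exact Or.inr ⟨r, hr, hq⟩

theorem mem_stepA (n : Int) (s : PySem.Set (Int × Int)) (r : Int) (x : Int × Int) :
    x ∈ stepA n s r ↔ x ∈ s ∨
      ((PySem.Int.mod n r = 0 ∧ 1 ≤ PySem.Int.floordiv n r ∧ x = (r, PySem.Int.floordiv n r)) ∨
       (1 < r ∧ PySem.Int.mod (n + 1) r = 0 ∧ 1 ≤ PySem.Int.floordiv (n + 1) r ∧
         x = (r, PySem.Int.floordiv (n + 1) r))) := by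
  simp only [stepA]
  split_ifs <;> simp [PySem.Set.mem_add] <;> tauto

theorem nodup_stepA (n : Int) (s : PySem.Set (Int × Int)) (r : Int) (hs : s.Nodup) :
    (stepA n s r).Nodup := by
  simp only [stepA]
  split_ifs <;> first
    | exact hs
    | exact PySem.Set.nodup_add _ _ hs
    | exact PySem.Set.nodup_add _ _ (PySem.Set.nodup_add _ _ hs)

theorem nodup_foldl {α β : Type} (f : List α → β → List α)
    (hf : ∀ s r, s.Nodup → (f s r).Nodup) :
    ∀ (l : List β) (s : List α), s.Nodup → (l.foldl f s).Nodup := by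
  intro l
  induction l with
  | nil => intro s hs; simpa using hs
  | cons a t ih => intro s hs; exact ih _ (hf s a hs)

-- A's set membership
theorem mem_setA (n : Int) (x : Int × Int) :
    x ∈ (PySem.List.pyRange 1 (n + 1) 1).foldl (stepA n) PySem.Set.empty ↔ PairsProp n x := by
  rw [mem_foldl_add (stepA n) _ (mem_stepA n)]
  simp only [PySem.Set.empty, List.not_mem_nil, false_or]
  constructor
  · rintro ⟨r, hr, hq⟩
    rw [PySem.List.mem_pyRange_one] at hr
    have hpos : 0 < r := by omega
    rcases hq with ⟨hmod, hb, rfl⟩ | ⟨hr1, hmod, hb, rfl⟩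
    · rw [PySem.Int.mod_eq_zero_iff_dvd] at hmod
      exact Or.inl ⟨by omega, by omega, hmod, by rw [PySem.Int.floordiv_eq_ediv_of_pos hpos]⟩
    · rw [PySem.Int.mod_eq_zero_iff_dvd] at hmod
      exact Or.inr ⟨by omega, by omega, hmod, by rw [PySem.Int.floordiv_eq_ediv_of_pos hpos]⟩
  · rintro (⟨h1, h2, hdvd, hx2⟩ | ⟨h1, h2, hdvd, hx2⟩)
    · have hpos : 0 < x.1 := by omega
      refine ⟨x.1, PySem.List.mem_pyRange_one.mpr ⟨by omega, by omega⟩, Or.inl ⟨?_, ?_, ?_⟩⟩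
      · exact (PySem.Int.mod_eq_zero_iff_dvd n x.1).mpr hdvd
      · rw [PySem.Int.floordiv_eq_ediv_of_pos hpos]
        exact (Int.le_ediv_iff_mul_le hpos).mpr (by omega)
      · rw [PySem.Int.floordiv_eq_ediv_of_pos hpos, ← hx2]
    · have hpos : 0 < x.1 := by omega
      refine ⟨x.1, PySem.List.mem_pyRange_one.mpr ⟨by omega, by omega⟩, Or.inr ⟨by omega, ?_, ?_, ?_⟩⟩
      · exact (PySem.Int.mod_eq_zero_iff_dvd (n + 1) x.1).mpr hdvd
      · rw [PySem.Int.floordiv_eq_ediv_of_pos hpos]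
        exact (Int.le_ediv_iff_mul_le hpos).mpr (by omega)
      · rw [PySem.Int.floordiv_eq_ediv_of_pos hpos, ← hx2]

-- the divisors loop
theorem mem_divisorsAux (m i : Int) (ds : List Int) (hi : 1 ≤ i) (x : Int) :
      x ∈ divisorsAux m i ds hi ↔ x ∈ ds ∨
        ∃ j, i ≤ j ∧ j * j ≤ m ∧ j ∣ m ∧ (x = j ∨ x = m / j) := by
  induction i, ds, hi using divisorsAux.induct m with
  | case1 i ds hi h ih =>
    rw [divisorsAux, if_pos h]
    simp only [dite_eq_ite] at ih
    rw [ih]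
    have hpos : 0 < i := by omega
    have hdvd := PySem.Int.mod_eq_zero_iff_dvd m i
    rw [PySem.Int.floordiv_eq_ediv_of_pos hpos]
    by_cases hd : i ∣ m
    · rw [if_pos (hdvd.mpr hd)]
      have hmem : ∀ y : Int, (y ∈ ds ++ [i] ++ (if m / i ≠ i then [m / i] else [])) ↔
          (y ∈ ds ∨ (y = i ∨ y = m / i)) := by
        intro y
        by_cases hne : m / i = i <;> simp [hne]
      rw [hmem]
      constructor
      · rintro ((hx | hx) | ⟨j, hj1, hj2, hj3, hj4⟩)
        · exact Or.inl hx
        · exact Or.inr ⟨i, le_refl i, h, hd, hx⟩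
        · exact Or.inr ⟨j, by omega, hj2, hj3, hj4⟩
      · rintro (hx | ⟨j, hj1, hj2, hj3, hj4⟩)
        · exact Or.inl (Or.inl hx)
        · rcases eq_or_lt_of_le hj1 with rfl | hlt
          · exact Or.inl (Or.inr hj4)
          · exact Or.inr ⟨j, by omega, hj2, hj3, hj4⟩
    · rw [if_neg (fun hc => hd (hdvd.mp hc))]
      constructor
      · rintro (hx | ⟨j, hj1, hj2, hj3, hj4⟩)
        · exact Or.inl hx
        · exact Or.inr ⟨j, by omega, hj2, hj3, hj4⟩
      · rintro (hx | ⟨j, hj1, hj2, hj3, hj4⟩)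
        · exact Or.inl hx
        · rcases eq_or_lt_of_le hj1 with rfl | hlt
          · exact absurd hj3 hd
          · exact Or.inr ⟨j, by omega, hj2, hj3, hj4⟩
  | case2 i ds hi h =>
    rw [divisorsAux, if_neg h]
    constructor
    · exact Or.inl
    · rintro (hx | ⟨j, hj1, hj2, hj3, hj4⟩)
      · exact hx
      · exfalso
        have : i * i ≤ j * j := by nlinarith
        omega

theorem mem_divisors (m : Int) (x : Int) :
    x ∈ divisors m ↔ 1 ≤ m ∧ 1 ≤ x ∧ x ∣ m := by
  rw [divisors, mem_divisorsAux]
  simp only [List.not_mem_nil, false_or]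
  constructor
  · rintro ⟨j, hj1, hj2, hj3, hx⟩
    have hm : 1 ≤ m := by nlinarith
    have hjm : j ≤ m := by nlinarith
    refine ⟨hm, ?_⟩
    rcases hx with rfl | rfl
    · exact ⟨hj1, hj3⟩
    · have hdvd : m / j ∣ m := ⟨j, (Int.ediv_mul_cancel hj3).symm⟩
      have h1 : 1 ≤ m / j := (Int.le_ediv_iff_mul_le (by omega)).mpr (by omega)
      exact ⟨h1, hdvd⟩
  · rintro ⟨hm, hx, hdvd⟩
    have hxm : x ≤ m := Int.le_of_dvd (by omega) hdvd
    by_cases hsq : x * x ≤ m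
    · exact ⟨x, hx, hsq, hdvd, Or.inl rfl⟩
    · have hme : m / x * x = m := Int.ediv_mul_cancel hdvd
      have he1 : 1 ≤ m / x := (Int.le_ediv_iff_mul_le (by omega)).mpr (by omega)
      have helt : m / x < x := by nlinarith
      refine ⟨m / x, he1, by nlinarith, ⟨x, hme.symm ▸ by ring⟩, Or.inr ?_⟩
      have h2 : m / x * x / (m / x) = x := Int.mul_ediv_cancel_left x (by omega : m / x ≠ 0)
      rw [hme] at h2
      exact h2.symm

theorem mem_setB (n : Int) (x : Int × Int) :
    x ∈ (divisors (n + 1)).foldl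
        (fun pairs r =>
          if 1 < r ∧ r ≤ n then
            PySem.Set.add pairs (r, PySem.Int.floordiv (n + 1) r)
          else pairs)
        (PySem.Set.ofList ((divisors n).map (fun r => (r, PySem.Int.floordiv n r)))) ↔
      PairsProp n x := by
  rw [mem_foldl_add _ (fun r y => (1 < r ∧ r ≤ n) ∧ y = (r, PySem.Int.floordiv (n + 1) r))
    (by intro s r y; dsimp only; split_ifs with h <;> simp [PySem.Set.mem_add] <;> tauto)]
  simp only [PySem.Set.mem_ofList, List.mem_map, mem_divisors]
  constructor
  · rintro (⟨r, ⟨hn, hr, hdvd⟩, rfl⟩ | ⟨r, ⟨hn1, hr, hdvd⟩, ⟨hr1, hrn⟩, rfl⟩)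
    · have hpos : 0 < r := by omega
      have hrn : r ≤ n := Int.le_of_dvd (by omega) hdvd
      exact Or.inl ⟨by omega, hrn, hdvd, by rw [PySem.Int.floordiv_eq_ediv_of_pos hpos]⟩
    · have hpos : 0 < r := by omega
      exact Or.inr ⟨by omega, hrn, hdvd, by rw [PySem.Int.floordiv_eq_ediv_of_pos hpos]⟩
  · rintro (⟨h1, h2, hdvd, hx2⟩ | ⟨h1, h2, hdvd, hx2⟩)
    · have hpos : 0 < x.1 := by omega
      refine Or.inl ⟨x.1, ⟨by omega, by omega, hdvd⟩, ?_⟩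
      rw [PySem.Int.floordiv_eq_ediv_of_pos hpos, ← hx2]
    · have hpos : 0 < x.1 := by omega
      refine Or.inr ⟨x.1, ⟨by omega, by omega, hdvd⟩, ⟨by omega, by omega⟩, ?_⟩
      rw [PySem.Int.floordiv_eq_ediv_of_pos hpos, ← hx2]

-- sorted2 on pairs is sorting by the lexicographic order
theorem sorted2_eq_sorted_toLex (xs : List (Int × Int)) :
    PySem.List.sorted2 xs Prod.fst Prod.snd =
      PySem.List.sorted xs (fun x => (toLex x : Int ×ₗ Int)) := by
  rw [PySem.List.sorted_eq_foldl_insertBy]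
  simp only [PySem.List.sorted2]
  congr 1
  funext acc x
  congr 1
  funext a b
  have : (toLex a < toLex b) ↔ (a.1 < b.1 ∨ a.1 = b.1 ∧ a.2 < b.2) := Prod.Lex.lt_iff
  by_cases h1 : a.1 < b.1 <;> by_cases h2 : b.1 < a.1 <;> by_cases h3 : a.2 < b.2 <;>
    simp [this, h1, h2, h3] <;> omega

-- ===== VERDICT (by name: the statement is the Claim_ definition above) =====
theorem generate_r_b_pairs_spec : Claim_equal_generate_r_b_pairs := by
  intro n _
  unfold Spec_generate_r_b_pairs generate_r_b_pairs generate_r_b_pairs_alt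
  rw [sorted2_eq_sorted_toLex, sorted2_eq_sorted_toLex]
  apply PySem.List.sorted_eq_sorted_of_perm
  · exact fun a b h => by simpa using congrArg ofLex h
  · rw [List.perm_ext_iff_of_nodup]
    · intro x
      rw [mem_setA, mem_setB]
    · exact nodup_foldl _ (nodup_stepA n) _ _ (by simp [PySem.Set.empty])
    · apply nodup_foldl
      · intro s r hs
        dsimp only
        split_ifs
        · exact PySem.Set.nodup_add _ _ hs
        · exact hs
      · exact PySem.Set.nodup_ofList _
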